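-- pv_equiv track=rewrite | github.com/manwar/perlweeklychallenge-club | challenge-141/paulo-custodio/python/ch-2.py | numbers
-- ===== SOURCE A (Python) =====
-- def numbers(num):
--     ret = []
--     mask_n = 0
--     while True:
--         mask = ("{:0"+str(len(str(num)))+"b}").format(mask_n)
--         if len(mask) > len(str(num)):
--             break
--
--         # combine num with mask
--         res = 0
--         for i in range(len(str(num))):
--             if mask[i] == "1":
--                 res = 10*res + int(str(num)[i])
--
--         ret.append(res)
--         mask_n += 1
--
--     return ret
-- ===== SOURCE B (Python) =====
-- def numbers(num):
--     # Recursive power-set generation over the digit characters: each digit is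
--     # first excluded, then included; the deepest position varies fastest, which
--     # yields exactly the binary-counting mask order of the original.
--     ret = []
--
--     def build(rest, acc):
--         if not rest:
--             ret.append(acc)
--         else:
--             build(rest[1:], acc)
--             build(rest[1:], 10 * acc + int(rest[0]))
--
--     build(str(num), 0)
--     return ret
-- ===== Notes on version B (the rewrite author's own statement) =====
-- stated objective: alternative
-- what changed: Replaced the binary-mask counting loop (which re-renders str(num) and a zero-padded binary mask string for every mask and re-scans all digit positions per mask) by recursive power-set generation over the digit characters (exclude-then-include, deepest position fastest), doing constant work per recursion node with no string formatting.
import Mathlib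
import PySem

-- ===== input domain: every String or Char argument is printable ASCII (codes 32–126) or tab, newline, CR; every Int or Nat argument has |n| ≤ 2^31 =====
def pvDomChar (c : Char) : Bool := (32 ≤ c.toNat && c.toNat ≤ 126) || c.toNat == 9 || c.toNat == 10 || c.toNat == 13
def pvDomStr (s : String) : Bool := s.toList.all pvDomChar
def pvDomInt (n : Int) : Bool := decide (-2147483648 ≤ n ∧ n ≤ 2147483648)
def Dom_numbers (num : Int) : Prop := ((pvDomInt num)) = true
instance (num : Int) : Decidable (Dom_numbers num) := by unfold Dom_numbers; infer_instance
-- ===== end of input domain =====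

-- B replaces A's binary-mask counting loop (zero-padded binary string per mask)
-- by recursive power-set generation over the digit characters; equal return value on Pre_.


-- ===== PORT A =====

-- int(c) on a single digit character '0'..'9' (exact there; Pre_ keeps num ≥ 0,
-- so every character of str(num) is a digit).
def pvDigit (c : Char) : Int := (c.toNat : Int) - 48

-- ("{:0" + str(n) + "b}").format(maskN): zero-padded binary, ported by hand as
-- replicate-pad ++ binary digits (exact for maskN ≥ 0, which always holds here).
def pvMask (n : Nat) (maskN : Nat) : List Char :=
  List.replicate (n - (PySem.Int.toBinChars (maskN : Int)).length) '0'
    ++ PySem.Int.toBinChars (maskN : Int)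

-- Port of A's 'while True' loop: mask_n counts up, break when the mask outgrows
-- the digit count, else combine num with the mask and append.  The extra fuel
-- argument only makes the loop total; numbers passes enough for every iteration
-- the Python loop performs (proved in pvNumbersAux_eq below).
def numbersAux (s : List Char) (maskN : Nat) : Nat → List Int
  | 0 => []
  | fuel + 1 =>
    if s.length < (pvMask s.length maskN).length then []
    else
      ((List.range s.length).foldl
        (fun r i => if (pvMask s.length maskN).getD i ' ' = '1'
                    then 10 * r + pvDigit (s.getD i ' ') else r) 0)
        :: numbersAux s (maskN + 1) fuel

def numbers (num : Int) : List Int :=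
  numbersAux (PySem.Int.toChars num) 0 (2 ^ (PySem.Int.toChars num).length)

-- ===== PORT B =====

-- Port of B: recursive power-set generation over the remaining digit characters,
-- exclude-then-include; the append accumulator ret becomes list concatenation.
def buildAlt (acc : Int) : List Char → List Int
  | [] => [acc]
  | c :: rest => buildAlt acc rest ++ buildAlt (10 * acc + pvDigit c) rest

def numbers_alt (num : Int) : List Int := buildAlt 0 (PySem.Int.toChars num)

-- ===== PRECONDITION & SPEC =====

-- Pre_ excludes negative num: there A raises ValueError (int applied to the sign
-- character once the mask selects its position) — and B raises the same ValueError.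
def Pre_numbers (num : Int) : Prop := 0 ≤ num
instance (num : Int) : Decidable (Pre_numbers num) := by unfold Pre_numbers; infer_instance
def pvWitness_numbers : Int := 78

def Spec_numbers (num : Int) (out : List Int) : Prop := out = numbers_alt num
instance (num : Int) (out : List Int) : Decidable (Spec_numbers num out) := by unfold Spec_numbers; infer_instance

-- ===== CLAIM (what is proved, stated in full; the proofs are below) =====
def Claim_equal_numbers : Prop := ∀ (num : Int), Dom_numbers num → Pre_numbers num → Spec_numbers num (numbers num)

-- ===== LEMMAS AND PROOFS =====

-- Structural characterisation of Nat.toDigits 2 (binary rendering).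
def pvBinN (m : Nat) : List Char :=
  if m < 2 then [Nat.digitChar m] else pvBinN (m / 2) ++ [Nat.digitChar (m % 2)]
termination_by m
decreasing_by exact Nat.div_lt_self (by omega) (by omega)

theorem pvToDigitsCore_eq_binN : ∀ (f n : Nat) (acc : List Char), n < f →
    Nat.toDigitsCore 2 f n acc = pvBinN n ++ acc := by
  intro f
  induction f with
  | zero => intro n acc h; omega
  | succ f ih =>
    intro n acc h
    rw [Nat.toDigitsCore]
    by_cases h2 : n / 2 = 0
    · rw [if_pos h2]
      have hn : n < 2 := by omega
      conv_rhs => rw [pvBinN, if_pos hn]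
      have : n % 2 = n := Nat.mod_eq_of_lt hn
      simp [this]
    · rw [if_neg h2]
      have hlt : n / 2 < f := by omega
      rw [ih (n / 2) _ hlt]
      conv_rhs => rw [pvBinN, if_neg (by omega)]
      simp

theorem pvToBinChars_natCast (m : Nat) : PySem.Int.toBinChars (m : Int) = pvBinN m := by
  have h0 : ¬ ((m : Int) < 0) := by omega
  simp only [PySem.Int.toBinChars, if_neg h0, Int.toNat_natCast, Nat.toDigits]
  exact pvToDigitsCore_eq_binN (m + 1) m [] (by omega) |>.trans (by simp)

theorem pvBinN_pos (m : Nat) : 0 < (pvBinN m).length := by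
  rw [pvBinN]; split <;> simp

theorem pvBinN_len_le_iff : ∀ (m n : Nat), 1 ≤ n → ((pvBinN m).length ≤ n ↔ m < 2 ^ n) := by
  intro m
  induction m using Nat.strong_induction_on with
  | _ m ih =>
    intro n hn
    by_cases h2 : m < 2
    · rw [pvBinN, if_pos h2]
      simp only [List.length_singleton]
      have h2n : 2 ≤ 2 ^ n := by
        calc 2 = 2 ^ 1 := rfl
        _ ≤ 2 ^ n := Nat.pow_le_pow_right (by omega) hn
      constructor
      · intro _; omega
      · intro _; omega
    · rw [pvBinN, if_neg h2]
      rw [List.length_append, List.length_singleton]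
      rcases Nat.lt_or_ge n 2 with hn2 | hn2
      · have hn1 : n = 1 := by omega
        subst hn1
        have := pvBinN_pos (m / 2)
        constructor
        · intro h; omega
        · intro h; simp at h; omega
      · have ihm := ih (m / 2) (Nat.div_lt_self (by omega) (by omega)) (n - 1) (by omega)
        have hp : 2 ^ n = 2 * 2 ^ (n - 1) := by
          rw [← pow_succ']; congr 1; omega
        constructor
        · intro h
          have h1 : (pvBinN (m / 2)).length ≤ n - 1 := by omega
          have := ihm.mp h1
          omega
        · intro h
          have h1 : m / 2 < 2 ^ (n - 1) := by omega
          have := ihm.mpr h1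
          omega

-- Zero-padded binary of width k, LSB-peeling recursion.
def pvPadBits : Nat → Nat → List Char
  | 0, _ => []
  | k + 1, m => pvPadBits k (m / 2) ++ [Nat.digitChar (m % 2)]

-- The same list, MSB-peeling recursion.
def pvPadM : Nat → Nat → List Char
  | 0, _ => []
  | k + 1, m => (if 2 ^ k ≤ m then '1' else '0') :: pvPadM k (m % 2 ^ k)

theorem pvPadBits_zero (k : Nat) : pvPadBits k 0 = List.replicate k '0' := by
  induction k with
  | zero => rfl
  | succ k ih => rw [pvPadBits, Nat.zero_div, ih, List.replicate_succ']; rfl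

theorem pvPad_eq : ∀ (m n : Nat), m < 2 ^ n → 1 ≤ n →
    List.replicate (n - (pvBinN m).length) '0' ++ pvBinN m = pvPadBits n m := by
  intro m
  induction m using Nat.strong_induction_on with
  | _ m ih =>
    intro n hm hn
    by_cases h2 : m < 2
    · rw [pvBinN, if_pos h2]
      obtain ⟨k, rfl⟩ : ∃ k, n = k + 1 := ⟨n - 1, by omega⟩
      rw [pvPadBits]
      have hd : m / 2 = 0 := by omega
      rw [hd, pvPadBits_zero]
      have hmod : m % 2 = m := by omega
      rw [hmod]
      simp
    · have hn2 : 2 ≤ n := by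
        by_contra hc
        have h1 : n = 1 := by omega
        subst h1
        simp at hm; omega
      rw [pvBinN, if_neg h2]
      obtain ⟨k, rfl⟩ : ∃ k, n = k + 1 := ⟨n - 1, by omega⟩
      rw [pvPadBits]
      have hdiv : m / 2 < 2 ^ k := by
        have hp : 2 ^ (k + 1) = 2 * 2 ^ k := by rw [← pow_succ']
        omega
      have hih := ih (m / 2) (Nat.div_lt_self (by omega) (by omega)) k hdiv (by omega)
      rw [← hih]
      rw [List.length_append, List.length_singleton]
      have hL : (k + 1) - ((pvBinN (m / 2)).length + 1) = k - (pvBinN (m / 2)).length := by omega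
      rw [hL, ← List.append_assoc]

theorem pvPad_step : ∀ (k m : Nat), m < 2 ^ (k + 1) →
    pvPadM k (m / 2) ++ [Nat.digitChar (m % 2)] =
      (if 2 ^ k ≤ m then '1' else '0') :: pvPadM k (m % 2 ^ k) := by
  intro k
  induction k with
  | zero =>
    intro m hm
    interval_cases m <;> rfl
  | succ k ih =>
    intro m hm
    have hm' : m % 2 ^ (k + 1) < 2 ^ (k + 1) := Nat.mod_lt _ (by positivity)
    have e1 : m / 2 % 2 ^ k = m % 2 ^ (k + 1) / 2 := by
      rw [pow_succ', Nat.mod_mul_right_div_self]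
    have e2 : m % 2 = m % 2 ^ (k + 1) % 2 :=
      (Nat.mod_mod_of_dvd m (dvd_pow_self 2 (Nat.succ_ne_zero k))).symm
    rw [pvPadM, List.cons_append, e1, e2, ih (m % 2 ^ (k + 1)) hm']
    conv_rhs => rw [pvPadM]
    have hiff : (2 ^ k ≤ m / 2) ↔ (2 ^ (k + 1) ≤ m) := by
      have hp : 2 ^ (k + 1) = 2 * 2 ^ k := by rw [← pow_succ']
      omega
    by_cases hc : 2 ^ (k + 1) ≤ m
    · rw [if_pos hc, if_pos (hiff.mpr hc)]
    · rw [if_neg hc, if_neg (fun hcc => hc (hiff.mp hcc))]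

theorem pvPadBits_eq_padM : ∀ (k m : Nat), m < 2 ^ k → pvPadBits k m = pvPadM k m := by
  intro k
  induction k with
  | zero => intro m _; rfl
  | succ k ih =>
    intro m hm
    have hdiv : m / 2 < 2 ^ k := by
      have hp : 2 ^ (k + 1) = 2 * 2 ^ k := by rw [← pow_succ']
      omega
    rw [pvPadBits, ih (m / 2) hdiv, pvPad_step k m hm, pvPadM]

-- The mask/digits combination as simultaneous recursion on the two lists.
def pvZFold : List Char → List Char → Int → Int
  | c :: cs, d :: ds, acc => pvZFold cs ds (if c = '1' then 10 * acc + pvDigit d else acc)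
  | _, _, acc => acc

theorem pvFold_eq_zfold : ∀ (s mask : List Char) (acc : Int), mask.length = s.length →
    (List.range s.length).foldl
      (fun r i => if mask.getD i ' ' = '1' then 10 * r + pvDigit (s.getD i ' ') else r) acc
      = pvZFold mask s acc := by
  intro s
  induction s with
  | nil => intro mask acc h; rw [List.length_eq_zero_iff.mp h]; rfl
  | cons d ds ih =>
    intro mask acc h
    cases mask with
    | nil => simp at h
    | cons c cs =>
      simp only [List.length_cons, List.range_succ_eq_map, List.foldl_cons, List.foldl_map]
      simp only [List.getD_cons_zero, List.getD_cons_succ]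
      rw [ih cs _ (by simpa using h)]
      rfl

theorem pvBuildAlt_eq : ∀ (s : List Char) (acc : Int),
    buildAlt acc s =
      (List.range (2 ^ s.length)).map (fun m => pvZFold (pvPadM s.length m) s acc) := by
  intro s
  induction s with
  | nil => intro acc; simp [buildAlt, pvPadM, pvZFold]
  | cons c rest ih =>
    intro acc
    rw [buildAlt, ih acc, ih (10 * acc + pvDigit c)]
    have hpow : 2 ^ (rest.length + 1) = 2 ^ rest.length + 2 ^ rest.length := by
      rw [pow_succ]; omega
    rw [List.length_cons, hpow, List.range_add, List.map_append, List.map_map]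
    congr 1
    · apply List.map_congr_left
      intro m hm
      rw [List.mem_range] at hm
      rw [pvPadM, if_neg (by omega), Nat.mod_eq_of_lt hm]
      simp [pvZFold]
    · apply List.map_congr_left
      intro j hj
      rw [List.mem_range] at hj
      simp only [Function.comp]
      rw [pvPadM, if_pos (by omega), Nat.add_mod_left, Nat.mod_eq_of_lt hj]
      simp [pvZFold]

theorem pvMask_length (n m : Nat) :
    (pvMask n m).length = (n - (pvBinN m).length) + (pvBinN m).length := by
  simp [pvMask, pvToBinChars_natCast]

theorem pvNumbersAux_eq : ∀ (s : List Char), 1 ≤ s.length → ∀ (fuel k : Nat),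
    2 ^ s.length - k ≤ fuel →
    numbersAux s k fuel = (List.range' k (2 ^ s.length - k)).map
      (fun m => pvZFold (pvPadM s.length m) s 0) := by
  intro s hs fuel
  induction fuel with
  | zero =>
    intro k hk
    have h0 : 2 ^ s.length - k = 0 := by omega
    rw [h0, numbersAux]
    rfl
  | succ fuel ih =>
    intro k hk
    by_cases hkend : 2 ^ s.length ≤ k
    · rw [numbersAux, if_pos ?_]
      · have h0 : 2 ^ s.length - k = 0 := by omega
        rw [h0]; rfl
      · have hlen : ¬ ((pvBinN k).length ≤ s.length) := by
          intro hc
          exact absurd ((pvBinN_len_le_iff k s.length hs).mp hc) (by omega)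
        rw [pvMask_length]
        omega
    · have hklt : k < 2 ^ s.length := by omega
      have hlen : (pvBinN k).length ≤ s.length := (pvBinN_len_le_iff k s.length hs).mpr hklt
      rw [numbersAux, if_neg ?_]
      · have hmask : pvMask s.length k = pvPadM s.length k := by
          rw [pvMask, pvToBinChars_natCast, pvPad_eq k s.length hklt hs,
            pvPadBits_eq_padM s.length k hklt]
        have hmlen : (pvPadM s.length k).length = s.length := by
          rw [← hmask, pvMask_length]
          omega
        rw [hmask, pvFold_eq_zfold s (pvPadM s.length k) 0 hmlen]
        have hrange : 2 ^ s.length - k = (2 ^ s.length - (k + 1)) + 1 := by omega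
        rw [hrange, List.range'_succ, List.map_cons, ih (k + 1) (by omega)]
      · rw [pvMask_length]
        omega

theorem pvToChars_length_pos (num : Int) : 1 ≤ (PySem.Int.toChars num).length := by
  have hcore : ∀ (f n : Nat) (c : Char) (acc : List Char),
      Nat.toDigitsCore 10 f n (c :: acc) ≠ [] := by
    intro f
    induction f with
    | zero => intro n c acc; simp [Nat.toDigitsCore]
    | succ f ih =>
      intro n c acc
      rw [Nat.toDigitsCore]
      split
      · simp
      · exact ih _ _ _
  have hdig : ∀ n : Nat, Nat.toDigits 10 n ≠ [] := by
    intro n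
    rw [Nat.toDigits, Nat.toDigitsCore]
    split
    · simp
    · exact hcore _ _ _ _
  rw [PySem.Int.toChars]
  split
  · simp
  · have hne := hdig num.toNat
    cases h : Nat.toDigits 10 num.toNat with
    | nil => exact absurd h hne
    | cons a l => simp

-- ===== VERDICT (by name: the statement is the Claim_ definition above) =====
theorem numbers_spec : Claim_equal_numbers := by
  intro num _ _
  unfold Spec_numbers numbers numbers_alt
  have hs1 : 1 ≤ (PySem.Int.toChars num).length := pvToChars_length_pos num
  rw [pvNumbersAux_eq (PySem.Int.toChars num) hs1 (2 ^ (PySem.Int.toChars num).length) 0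
        (by simp),
      pvBuildAlt_eq (PySem.Int.toChars num) 0]
  simp [List.range_eq_range']
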